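-- pv_equiv track=rewrite | github.com/jungmir/pycon-finance-automation | src/handlers/step8_evidence.py | _filter_new
-- ===== SOURCE A (Python) =====
-- def _filter_new(comments: list[dict], last_id: str | None) -> list[dict]:
--     if not last_id:
--         return comments
--     found = False
--     result = []
--     for comment in comments:
--         if found:
--             result.append(comment)
--         if comment["id"] == last_id:
--             found = True
--     return result
-- ===== SOURCE B (Python) =====
-- def _filter_new(comments: list[dict], last_id: str | None) -> list[dict]:
--     if not last_id:
--         return comments
--     idx = next((i for i, c in enumerate(comments) if c["id"] == last_id), None)
--     if idx is None:
--         return []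
--     return comments[idx + 1:]
-- ===== Notes on version B (the rewrite author's own statement) =====
-- stated objective: simpler
-- what changed: B finds the index of the first comment whose id matches and returns the suffix slice after it (find-then-slice), instead of A's scan with a found flag and an accumulator list.
import Mathlib
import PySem

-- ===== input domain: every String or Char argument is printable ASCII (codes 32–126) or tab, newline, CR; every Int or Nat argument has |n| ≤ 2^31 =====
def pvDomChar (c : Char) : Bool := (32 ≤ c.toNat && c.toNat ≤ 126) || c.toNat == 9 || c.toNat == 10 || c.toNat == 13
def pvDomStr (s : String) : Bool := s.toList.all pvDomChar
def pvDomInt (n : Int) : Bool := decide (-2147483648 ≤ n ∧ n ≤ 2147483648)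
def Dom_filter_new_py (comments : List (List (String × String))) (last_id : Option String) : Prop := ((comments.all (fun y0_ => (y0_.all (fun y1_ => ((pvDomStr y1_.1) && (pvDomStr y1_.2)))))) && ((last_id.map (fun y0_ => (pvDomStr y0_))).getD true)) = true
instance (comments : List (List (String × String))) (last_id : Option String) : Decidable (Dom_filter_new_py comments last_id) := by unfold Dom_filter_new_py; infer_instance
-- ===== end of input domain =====

-- B replaces A's found-flag scan with find-first-index then suffix slice (simpler decomposition).

-- ===== PORT A =====
-- one loop step of A: append when found, then set found on an id match
def filterNewStep (s : String) (st : Bool × List (List (String × String))) (c : List (String × String)) : Bool × List (List (String × String)) :=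
  let st2 := if st.1 then (st.1, st.2 ++ [c]) else st
  if c.lookup "id" = some s then (true, st2.2) else st2

def filter_new_py (comments : List (List (String × String))) (last_id : Option String) : List (List (String × String)) :=
  match last_id with
  | none => comments
  | some s =>
    if s = "" then comments
    else (comments.foldl (filterNewStep s) (false, [])).2

-- ===== PORT B =====
def filter_new_py_alt (comments : List (List (String × String))) (last_id : Option String) : List (List (String × String)) :=
  match last_id with
  | none => comments
  | some s =>
    if s = "" then comments
    else
      match comments.findIdx? (fun c => c.lookup "id" == some s) with
      | none => []
      | some i => comments.drop (i + 1)

-- ===== PRECONDITION & SPEC =====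
-- Pre_ excludes only inputs on which A raises KeyError: a truthy last_id with some comment lacking an "id" key.
def Pre_filter_new_py (comments : List (List (String × String))) (last_id : Option String) : Prop :=
  (last_id.getD "" = "" ∨ comments.all (fun c => (c.lookup "id").isSome)) 
instance (comments : List (List (String × String))) (last_id : Option String) : Decidable (Pre_filter_new_py comments last_id) := by unfold Pre_filter_new_py; infer_instance

def pvWitness_filter_new_py : (List (List (String × String))) × Option String :=
  ([[("id", "a"), ("body", "x")], [("id", "b")]], some "a")

def Spec_filter_new_py (comments : List (List (String × String))) (last_id : Option String) (out : List (List (String × String))) : Prop := out = filter_new_py_alt comments last_id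
instance (comments : List (List (String × String))) (last_id : Option String) (out : List (List (String × String))) : Decidable (Spec_filter_new_py comments last_id out) := by unfold Spec_filter_new_py; infer_instance

-- ===== CLAIM (what is proved, stated in full; the proofs are below) =====
def Claim_equal_filter_new_py : Prop := ∀ (comments : List (List (String × String))) (last_id : Option String), Dom_filter_new_py comments last_id → Pre_filter_new_py comments last_id → Spec_filter_new_py comments last_id (filter_new_py comments last_id)

-- ===== LEMMAS AND PROOFS =====
-- once found = true, A's loop just appends every remaining comment
theorem foldl_step_found (s : String) (l : List (List (String × String))) (acc : List (List (String × String))) :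
    l.foldl (filterNewStep s) (true, acc) = (true, acc ++ l) := by
  induction l generalizing acc with
  | nil => simp
  | cons c cs ih =>
      simp only [List.foldl_cons, filterNewStep]
      split_ifs <;> simp [ih]

theorem foldl_step_eq (s : String) (l : List (List (String × String))) :
    (l.foldl (filterNewStep s) (false, [])).2 =
      match l.findIdx? (fun c => c.lookup "id" == some s) with
      | none => []
      | some i => l.drop (i + 1) := by
  induction l with
  | nil => simp
  | cons c cs ih =>
      simp only [List.foldl_cons, List.findIdx?_cons]
      by_cases h : c.lookup "id" = some s
      · simp [filterNewStep, h, foldl_step_found]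
      · rw [show (c.lookup "id" == some s) = false by simp [h]]
        simp only [filterNewStep, h, if_false, ih, Bool.false_eq_true, if_neg h]
        cases hfi : cs.findIdx? (fun c => c.lookup "id" == some s) <;>
          simp [hfi, List.drop_succ_cons]

-- ===== VERDICT (by name: the statement is the Claim_ definition above) =====
theorem filter_new_py_spec : Claim_equal_filter_new_py := by
  intro comments last_id _ _
  unfold Spec_filter_new_py filter_new_py filter_new_py_alt
  match last_id with
  | none => rfl
  | some s =>
      by_cases hs : s = ""
      · simp [hs]
      · simp only [if_neg hs]
        exact foldl_step_eq s comments
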